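-- pv_equiv track=rewrite | github.com/sreesha1502/tdt4225_assignment2_group_09 | InvalidActivities.py | mergeUsers
-- ===== SOURCE A (Python) =====
-- def mergeUsers(users):
--     merged_objects = {}
--     for obj in users:
--         key = obj['user']
--         if key not in merged_objects:
--             merged_objects[key] = obj.copy()
--         else:
--             merged_objects[key]['activity'] = obj['activity']
--
--     return list(merged_objects.values())
-- ===== SOURCE B (Python) =====
-- def mergeUsers(users):
--     users = list(users)
--     # pass 1: for every non-first occurrence of a user key, remember its activity
--     # (last one wins)
--     seen = set()
--     last = {}
--     for obj in users:
--         key = obj['user']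
--         if key in seen:
--             last[key] = obj['activity']
--         else:
--             seen.add(key)
--     # pass 2: one copy per first-seen key, activity patched from the table
--     result = {}
--     for obj in users:
--         key = obj['user']
--         if key not in result:
--             d = obj.copy()
--             if key in last:
--                 d['activity'] = last[key]
--             result[key] = d
--     return list(result.values())
-- ===== Notes on version B (the rewrite author's own statement) =====
-- stated objective: alternative
-- what changed: A builds the merged dicts in one pass that mutates already-stored entries on each duplicate; B makes two read-only passes: it first builds a last-activity table for duplicated keys, then emits one patched copy per first-seen key.
-- outside the precondition, e.g. on mergeUsers([{'activity': 'x'}]): A raises KeyError, B raises KeyError; on mergeUsers([{'user': 'a', 'activity': 'x'}, {'user': 'a'}]): A raises KeyError, B raises KeyError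
import Mathlib
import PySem

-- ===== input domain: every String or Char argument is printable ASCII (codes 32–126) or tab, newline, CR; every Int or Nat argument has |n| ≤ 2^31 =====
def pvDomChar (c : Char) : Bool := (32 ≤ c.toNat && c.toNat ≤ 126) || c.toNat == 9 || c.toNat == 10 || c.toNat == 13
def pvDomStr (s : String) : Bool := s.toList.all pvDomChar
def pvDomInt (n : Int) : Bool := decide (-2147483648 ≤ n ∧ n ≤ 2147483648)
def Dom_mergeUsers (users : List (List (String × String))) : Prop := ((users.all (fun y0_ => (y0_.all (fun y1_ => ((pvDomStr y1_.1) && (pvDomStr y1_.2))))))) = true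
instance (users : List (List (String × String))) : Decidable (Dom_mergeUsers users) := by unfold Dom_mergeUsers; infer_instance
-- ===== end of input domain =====

-- B replaces A's single mutating pass by two read-only passes (a last-activity table, then one copy
-- per first-seen key); objective: alternative decomposition, same O(n) cost. Return-value equivalence only
-- (A mutates nothing the caller sees: it copies each stored obj).

-- ===== PORT A =====
-- obj['user'] / obj['activity'] (KeyError excluded by Pre_; the port defaults to "")
def pvKey (obj : List (String × String)) : String := (PySem.Dict.mk obj).getD "user" ""
def pvAct (obj : List (String × String)) : String := (PySem.Dict.mk obj).getD "activity" ""

def mergeUsersStep (merged : PySem.Dict String (PySem.Dict String String))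
    (obj : List (String × String)) : PySem.Dict String (PySem.Dict String String) :=
  let key := pvKey obj
  if merged.contains key = false then
    merged.insert key (PySem.Dict.mk obj)             -- merged_objects[key] = obj.copy()
  else
    merged.modify key PySem.Dict.empty (fun v => v.insert "activity" (pvAct obj))  -- merged_objects[key]['activity'] = obj['activity']

def mergeUsers (users : List (List (String × String))) : List (List (String × String)) :=
  ((users.foldl mergeUsersStep PySem.Dict.empty).values).map (fun d => d.items)

-- ===== PORT B =====
-- pass 1: for every non-first occurrence of a key, remember its activity (last wins)
def mergeUsersPass1Step (p : PySem.Set String × PySem.Dict String String)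
    (obj : List (String × String)) : PySem.Set String × PySem.Dict String String :=
  let key := pvKey obj
  if PySem.Set.contains p.1 key then (p.1, p.2.insert key (pvAct obj))
  else (PySem.Set.add p.1 key, p.2)

-- d = obj.copy(); if key in last: d['activity'] = last[key]
def mergeUsersEntry (last : PySem.Dict String String) (obj : List (String × String)) :
    PySem.Dict String String :=
  let d := PySem.Dict.mk obj
  if last.contains (pvKey obj) then d.insert "activity" (last.getD (pvKey obj) "") else d

-- pass 2: one entry per first-seen key
def mergeUsersPass2Step (last : PySem.Dict String String)
    (result : PySem.Dict String (PySem.Dict String String))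
    (obj : List (String × String)) : PySem.Dict String (PySem.Dict String String) :=
  let key := pvKey obj
  if result.contains key = false then result.insert key (mergeUsersEntry last obj) else result

def mergeUsers_alt (users : List (List (String × String))) : List (List (String × String)) :=
  let last := (users.foldl mergeUsersPass1Step (PySem.Set.empty, PySem.Dict.empty)).2
  ((users.foldl (mergeUsersPass2Step last) PySem.Dict.empty).values).map (fun d => d.items)

-- ===== PRECONDITION & SPEC =====
-- Pre_ excludes exactly the inputs where A raises KeyError: an obj without a 'user' key, or an obj
-- whose 'user' value already occurred earlier and which lacks an 'activity' key.
def Pre_mergeUsers (users : List (List (String × String))) : Prop :=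
  (∀ obj ∈ users, (PySem.Dict.mk obj).contains "user" = true) ∧
  (∀ j < users.length, ∀ i < j,
    pvKey (users.getD i []) = pvKey (users.getD j []) →
    (PySem.Dict.mk (users.getD j [])).contains "activity" = true)
instance (users : List (List (String × String))) : Decidable (Pre_mergeUsers users) := by
  unfold Pre_mergeUsers; infer_instance

def pvWitness_mergeUsers : (List (List (String × String))) :=
  [[("user", "a"), ("activity", "x")], [("user", "b")], [("user", "a"), ("activity", "y")]]

def Spec_mergeUsers (users : List (List (String × String))) (out : List (List (String × String))) : Prop := out = mergeUsers_alt users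
instance (users : List (List (String × String))) (out : List (List (String × String))) : Decidable (Spec_mergeUsers users out) := by unfold Spec_mergeUsers; infer_instance

-- ===== CLAIM (what is proved, stated in full; the proofs are below) =====
def Claim_equal_mergeUsers : Prop := ∀ (users : List (List (String × String))), Dom_mergeUsers users → Pre_mergeUsers users → Spec_mergeUsers users (mergeUsers users)

-- ===== LEMMAS AND PROOFS =====

-- the activities of the objects of l whose user key is k, in order
def actsAt (l : List (List (String × String))) (k : String) : List String :=
  (l.filter (fun o => pvKey o == k)).map pvAct

def applyActs (v : PySem.Dict String String) (acts : List String) : PySem.Dict String String :=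
  acts.foldl (fun v a => v.insert "activity" a) v

-- the final dict entry A builds for key k from the objects of l (none if k never occurs)
def finA : List (List (String × String)) → String → Option (PySem.Dict String String)
  | [], _ => none
  | o :: t, k => if pvKey o = k then some (applyActs (PySem.Dict.mk o) (actsAt t k)) else finA t k

-- the entry B's pass 1 leaves for key k (b = "k already seen before l")
def dupAct : Bool → List (List (String × String)) → String → Option String
  | _, [], _ => none
  | b, o :: t, k =>
    if pvKey o = k then (dupAct true t k).or (if b then some (pvAct o) else none)
    else dupAct b t k

def firstObj : List (List (String × String)) → String → Option (List (String × String))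
  | [], _ => none
  | o :: t, k => if pvKey o = k then some o else firstObj t k

theorem applyActs_eq_getLast? (acts : List String) (v : PySem.Dict String String) :
    applyActs v acts = match acts.getLast? with
      | some a => v.insert "activity" a
      | none => v := by
  induction acts generalizing v with
  | nil => rfl
  | cons a t ih =>
    cases t with
    | nil => rfl
    | cons b t' =>
      simp only [applyActs, List.foldl_cons] at *
      rw [ih]
      rw [List.getLast?_cons_cons]
      cases h : (b :: t').getLast? with
      | none => simp at h
      | some c => simp [PySem.Dict.insert_insert_self]

theorem getLast?_cons_or {α : Type} (x : α) (xs : List α) :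
    (x :: xs).getLast? = xs.getLast?.or (some x) := by
  cases xs with
  | nil => rfl
  | cons b t => rw [List.getLast?_cons_cons]; cases h : (b :: t).getLast? <;> simp_all

theorem dupAct_true_eq (t : List (List (String × String))) (k : String) :
    dupAct true t k = (actsAt t k).getLast? := by
  induction t with
  | nil => rfl
  | cons o t ih =>
    by_cases h : pvKey o = k
    · simp only [dupAct, actsAt, List.filter_cons, h]
      simp only [BEq.rfl, if_pos, List.map_cons, getLast?_cons_or]
      rw [ih]; rfl
    · simp only [dupAct, if_neg h, ih, actsAt, List.filter_cons]
      simp [h]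

theorem finA_eq (l : List (List (String × String))) (k : String) :
    finA l k = (firstObj l k).map (fun o =>
      match dupAct false l k with
      | some a => (PySem.Dict.mk o).insert "activity" a
      | none => PySem.Dict.mk o) := by
  induction l with
  | nil => rfl
  | cons o t ih =>
    by_cases h : pvKey o = k
    · simp only [finA, firstObj, dupAct, if_pos h, Option.map_some]
      rw [applyActs_eq_getLast?, dupAct_true_eq]
      cases (actsAt t k).getLast? <;> rfl
    · simp only [finA, firstObj, dupAct, if_neg h, ih]

-- A's fold, characterised per key
theorem foldA_getD (l : List (List (String × String)))
    (d : PySem.Dict String (PySem.Dict String String)) (hn : d.keys.Nodup) (k : String) :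
    (l.foldl mergeUsersStep d).getD k PySem.Dict.empty =
      if d.contains k then applyActs (d.getD k PySem.Dict.empty) (actsAt l k)
      else (finA l k).getD PySem.Dict.empty := by
  induction l generalizing d with
  | nil =>
    by_cases hc : d.contains k = true
    · simp [hc, actsAt, applyActs]
    · simp only [Bool.not_eq_true] at hc
      simp [hc, finA, PySem.Dict.getD_of_not_contains d PySem.Dict.empty hc]
  | cons o t ih =>
    simp only [List.foldl_cons]
    by_cases hk0 : d.contains (pvKey o) = true
    · have hstep : mergeUsersStep d o
          = d.modify (pvKey o) PySem.Dict.empty (fun v => v.insert "activity" (pvAct o)) := by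
        simp [mergeUsersStep, hk0]
      rw [hstep]
      have hn' : (d.modify (pvKey o) PySem.Dict.empty
          (fun v => v.insert "activity" (pvAct o))).keys.Nodup := by
        rw [PySem.Dict.keys_modify]; exact PySem.Dict.nodup_keys_insert _ _ _ hn
      rw [ih _ hn']
      by_cases hk : k = pvKey o
      · subst hk
        simp [PySem.Dict.contains_modify, hk0, actsAt, applyActs]
      · have hk' : pvKey o ≠ k := fun e => hk e.symm
        simp [PySem.Dict.contains_modify, PySem.Dict.getD_modify, hk, hk', actsAt, finA]
    · simp only [Bool.not_eq_true] at hk0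
      have hstep : mergeUsersStep d o = d.insert (pvKey o) (PySem.Dict.mk o) := by
        simp [mergeUsersStep, hk0]
      rw [hstep]
      rw [ih _ (PySem.Dict.nodup_keys_insert _ _ _ hn)]
      by_cases hk : k = pvKey o
      · subst hk
        simp [hk0, actsAt, finA, applyActs]
      · have hk' : pvKey o ≠ k := fun e => hk e.symm
        simp [PySem.Dict.contains_insert, PySem.Dict.getD_insert, hk, hk', actsAt, finA, beq_iff_eq]

theorem foldA_keys (l : List (List (String × String)))
    (d : PySem.Dict String (PySem.Dict String String)) :
    (l.foldl mergeUsersStep d).keys = PySem.Set.update d.keys (l.map pvKey) := by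
  induction l generalizing d with
  | nil => rfl
  | cons o t ih =>
    simp only [List.foldl_cons, List.map_cons, PySem.Set.update_cons]
    rw [ih]
    congr 1
    by_cases hk0 : d.contains (pvKey o) = true
    · have hm : pvKey o ∈ d.keys := (PySem.Dict.contains_iff_mem_keys d _).mp hk0
      have hstep : mergeUsersStep d o
          = d.modify (pvKey o) PySem.Dict.empty (fun v => v.insert "activity" (pvAct o)) := by
        simp [mergeUsersStep, hk0]
      rw [hstep, PySem.Dict.keys_modify, PySem.Dict.keys_insert_of_contains _ _ hk0,
        PySem.Set.add_of_mem hm]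
    · simp only [Bool.not_eq_true] at hk0
      have hm : pvKey o ∉ d.keys := fun h =>
        by simp [(PySem.Dict.contains_iff_mem_keys d _).mpr h] at hk0
      have hstep : mergeUsersStep d o = d.insert (pvKey o) (PySem.Dict.mk o) := by
        simp [mergeUsersStep, hk0]
      rw [hstep, PySem.Dict.keys_insert_of_not_contains _ _ hk0,
        PySem.Set.add_of_not_mem hm]

theorem pass1_get? (l : List (List (String × String))) (s : PySem.Set String)
    (d : PySem.Dict String String) (k : String) :
    ((l.foldl mergeUsersPass1Step (s, d)).2).get? k =
      (dupAct (PySem.Set.contains s k) l k).or (d.get? k) := by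
  induction l generalizing s d with
  | nil => rfl
  | cons o t ih =>
    simp only [List.foldl_cons, mergeUsersPass1Step]
    by_cases hs : PySem.Set.contains s (pvKey o) = true
    · rw [if_pos hs]
      rw [ih]
      by_cases hk : pvKey o = k
      · subst hk
        simp only [dupAct, hs, if_pos, PySem.Dict.get?_insert_self]
        cases dupAct true t (pvKey o) <;> rfl
      · have hk' : k ≠ pvKey o := fun e => hk e.symm
        rw [PySem.Dict.get?_insert_of_ne _ _ hk']
        simp only [dupAct, if_neg hk]
    · simp only [Bool.not_eq_true] at hs
      rw [if_neg (by rw [hs]; simp)]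
      rw [ih]
      by_cases hk : pvKey o = k
      · subst hk
        have h1 : PySem.Set.contains (PySem.Set.add s (pvKey o)) (pvKey o) = true := by
          rw [PySem.Set.contains_iff]; exact (PySem.Set.mem_add _ _ _).mpr (Or.inr rfl)
        simp only [dupAct, hs, h1]
        cases dupAct true t (pvKey o) <;> rfl
      · have h1 : PySem.Set.contains (PySem.Set.add s (pvKey o)) k = PySem.Set.contains s k := by
          by_cases hks : k ∈ s
          · simp [hks, PySem.Set.mem_add]
          · have : k ∉ PySem.Set.add s (pvKey o) := by
              rw [PySem.Set.mem_add]; rintro (h | h); exact hks h; exact hk h.symm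
            simp [hks, this]
        simp only [dupAct, if_neg hk, h1]

theorem pass2_getD (last : PySem.Dict String String) (l : List (List (String × String)))
    (res : PySem.Dict String (PySem.Dict String String)) (hn : res.keys.Nodup) (k : String) :
    (l.foldl (mergeUsersPass2Step last) res).getD k PySem.Dict.empty =
      if res.contains k then res.getD k PySem.Dict.empty
      else ((firstObj l k).map (mergeUsersEntry last)).getD PySem.Dict.empty := by
  induction l generalizing res with
  | nil =>
    by_cases hc : res.contains k = true
    · simp [hc]
    · simp only [Bool.not_eq_true] at hc
      simp [hc, firstObj, PySem.Dict.getD_of_not_contains res PySem.Dict.empty hc]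
  | cons o t ih =>
    simp only [List.foldl_cons, mergeUsersPass2Step]
    by_cases hk0 : res.contains (pvKey o) = true
    · rw [if_neg (by simp [hk0])]
      rw [ih _ hn]
      by_cases hk : k = pvKey o
      · subst hk
        simp [hk0]
      · have hk' : pvKey o ≠ k := fun e => hk e.symm
        simp [firstObj, hk']
    · simp only [Bool.not_eq_true] at hk0
      rw [if_pos (by simp [hk0])]
      rw [ih _ (PySem.Dict.nodup_keys_insert _ _ _ hn)]
      by_cases hk : k = pvKey o
      · subst hk
        simp [hk0, firstObj]
      · have hk' : pvKey o ≠ k := fun e => hk e.symm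
        simp [PySem.Dict.contains_insert, PySem.Dict.getD_insert, hk, hk', firstObj, beq_iff_eq]

theorem pass2_keys (last : PySem.Dict String String) (l : List (List (String × String)))
    (res : PySem.Dict String (PySem.Dict String String)) :
    (l.foldl (mergeUsersPass2Step last) res).keys = PySem.Set.update res.keys (l.map pvKey) := by
  induction l generalizing res with
  | nil => rfl
  | cons o t ih =>
    simp only [List.foldl_cons, List.map_cons, PySem.Set.update_cons, mergeUsersPass2Step]
    by_cases hk0 : res.contains (pvKey o) = true
    · have hm : pvKey o ∈ res.keys := (PySem.Dict.contains_iff_mem_keys res _).mp hk0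
      rw [if_neg (by simp [hk0]), ih, PySem.Set.add_of_mem hm]
    · simp only [Bool.not_eq_true] at hk0
      have hm : pvKey o ∉ res.keys := fun h =>
        by simp [(PySem.Dict.contains_iff_mem_keys res _).mpr h] at hk0
      rw [if_pos (by simp [hk0]), ih, PySem.Dict.keys_insert_of_not_contains _ _ hk0,
        PySem.Set.add_of_not_mem hm]

theorem firstObj_key (l : List (List (String × String))) (k : String)
    (o : List (String × String)) (h : firstObj l k = some o) : pvKey o = k := by
  induction l with
  | nil => simp [firstObj] at h
  | cons x t ih =>
    by_cases hx : pvKey x = k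
    · simp only [firstObj, if_pos hx] at h
      cases h; exact hx
    · simp only [firstObj, if_neg hx] at h
      exact ih h

theorem entry_eq (last : PySem.Dict String String) (users : List (List (String × String)))
    (k : String) (o : List (String × String)) (hk : pvKey o = k)
    (h : last.get? k = dupAct false users k) :
    mergeUsersEntry last o = match dupAct false users k with
      | some a => (PySem.Dict.mk o).insert "activity" a
      | none => PySem.Dict.mk o := by
  cases hd : dupAct false users k with
  | none =>
    have hc : last.contains k = false := by
      rw [PySem.Dict.contains_eq_isSome_get?, h, hd]; rfl
    simp [mergeUsersEntry, hk, hc]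
  | some a =>
    have hc : last.contains k = true := by
      rw [PySem.Dict.contains_eq_isSome_get?, h, hd]; rfl
    have hg : last.getD k "" = a := PySem.Dict.getD_of_get?_eq_some _ _ (h.trans hd)
    simp [mergeUsersEntry, hk, hc, hg]

-- ===== VERDICT (by name: the statement is the Claim_ definition above) =====
theorem mergeUsers_spec : Claim_equal_mergeUsers := by
  intro users _ _
  unfold Spec_mergeUsers mergeUsers mergeUsers_alt
  dsimp only
  have hlast : ∀ k, ((users.foldl mergeUsersPass1Step (PySem.Set.empty, PySem.Dict.empty)).2).get? k
      = dupAct false users k := by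
    intro k
    rw [pass1_get?]
    simp [PySem.Set.empty, PySem.Dict.get?_empty, Option.or_none]
  have hAkeys : (users.foldl mergeUsersStep PySem.Dict.empty).keys
      = PySem.Set.ofList (users.map pvKey) := by
    rw [foldA_keys, PySem.Dict.keys_empty, PySem.Set.update_nil_left]
  have hBkeys : (users.foldl (mergeUsersPass2Step
        ((users.foldl mergeUsersPass1Step (PySem.Set.empty, PySem.Dict.empty)).2))
        PySem.Dict.empty).keys = PySem.Set.ofList (users.map pvKey) := by
    rw [pass2_keys, PySem.Dict.keys_empty, PySem.Set.update_nil_left]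
  rw [PySem.Dict.values_eq_map_keys _ (hAkeys ▸ PySem.Set.nodup_ofList _) PySem.Dict.empty,
    PySem.Dict.values_eq_map_keys _ (hBkeys ▸ PySem.Set.nodup_ofList _) PySem.Dict.empty,
    hAkeys, hBkeys, List.map_map, List.map_map]
  apply List.map_congr_left
  intro k _
  simp only [Function.comp_apply]
  congr 1
  rw [foldA_getD _ _ PySem.Dict.nodup_keys_empty k,
    pass2_getD _ _ _ PySem.Dict.nodup_keys_empty k]
  simp only [PySem.Dict.contains_empty, Bool.false_eq_true, if_false]
  rw [finA_eq]
  cases hfo : firstObj users k with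
  | none => simp
  | some o =>
    simp only [Option.map_some, Option.getD_some]
    exact (entry_eq _ users k o (firstObj_key users k o hfo) (hlast k)).symm
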